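-- pv_equiv track=rewrite | github.com/NikitaNikell/Python_developer_summer-2024_Trial_exam_Tinkoff | Task_2/max_fives_count_v2.py | max_fives_count_in_sequence
-- ===== SOURCE A (Python) =====
-- def max_fives_count_in_sequence(n, marks):
--     max_fives_count = 0
--     current_fives_count = 0
--     current_sequence = 0
--     found_sequence = False
--
--     for i in range(n):
--         if marks[i] == 5 and current_sequence < 7:
--             current_fives_count += 1
--         if marks[i] != 2 and marks[i] != 3:
--             current_sequence += 1
--             if current_sequence == 7 or (len(marks) // 2) < 7:  # 5 5 5 5 5 3 5 5 5 5 5 5 5 5 5 5 5 5 5 5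
--                 found_sequence = True
--         else:
--             if found_sequence:
--                 max_fives_count = max(max_fives_count, current_fives_count)
--                 found_sequence = False
--             current_fives_count = 0
--             current_sequence = 0
--
--     if found_sequence:
--         max_fives_count = max(max_fives_count, current_fives_count)
--
--     if max_fives_count == 0:
--         return -1
--     else:
--         return max_fives_count
-- ===== SOURCE B (Python) =====
-- def max_fives_count_in_sequence(n, marks):
--     # Partition the first n marks into maximal runs of marks that are not 2/3.
--     prefix = marks[:n] if n > 0 else []
--     runs = []
--     cur = []
--     for m in prefix:
--         if m == 2 or m == 3:
--             if cur:
--                 runs.append(cur)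
--                 cur = []
--         else:
--             cur.append(m)
--     if cur:
--         runs.append(cur)
--     small = len(marks) // 2 < 7
--     best = 0
--     for run in runs:
--         if len(run) >= 7 or small:
--             best = max(best, run[:7].count(5))
--     return -1 if best == 0 else best
-- ===== Notes on version B (the rewrite author's own statement) =====
-- stated objective: alternative
-- what changed: B replaces A's single stateful index loop (running 5-count, run length, found flag, max) by a two-phase decomposition: it first partitions marks[:n] into maximal runs of non-2/3 marks, then takes the max over qualifying runs (length >= 7 or len(marks)//2 < 7) of the number of 5s in the run's first 7 elements.
import Mathlib
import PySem

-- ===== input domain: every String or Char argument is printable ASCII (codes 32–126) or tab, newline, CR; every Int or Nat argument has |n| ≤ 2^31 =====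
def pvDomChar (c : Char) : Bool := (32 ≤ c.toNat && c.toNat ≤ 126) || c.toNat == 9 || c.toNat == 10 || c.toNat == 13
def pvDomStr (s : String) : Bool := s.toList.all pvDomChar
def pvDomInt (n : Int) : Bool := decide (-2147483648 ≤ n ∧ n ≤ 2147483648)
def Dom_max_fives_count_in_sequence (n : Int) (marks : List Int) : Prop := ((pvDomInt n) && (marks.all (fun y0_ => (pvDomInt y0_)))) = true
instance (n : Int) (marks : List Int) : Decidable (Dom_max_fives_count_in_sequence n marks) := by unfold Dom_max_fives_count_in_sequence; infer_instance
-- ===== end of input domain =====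

-- B partitions the first n marks into separator-free runs and takes a max over the runs
-- (alternative decomposition, same cost); equivalence is about the return value only.

-- ===== PORT A =====
-- single left-to-right loop over indices, carrying (max, current 5-count, run length, found flag)
def pvAStep (small : Bool) (s : Int × Int × Int × Bool) (m : Int) : Int × Int × Int × Bool :=
  match s with
  | (mF, cF, cS, fnd) =>
    let cF := if m = 5 ∧ cS < 7 then cF + 1 else cF
    if m ≠ 2 ∧ m ≠ 3 then
      (mF, cF, cS + 1, if cS + 1 = 7 ∨ small = true then true else fnd)
    else
      if fnd then (max mF cF, 0, 0, false) else (mF, 0, 0, false)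

def max_fives_count_in_sequence (n : Int) (marks : List Int) : Int :=
  let small : Bool := decide (PySem.Int.floordiv (marks.length : Int) 2 < 7)
  let s := (PySem.List.pyRange 0 n 1).foldl
    (fun s i => pvAStep small s (PySem.List.pyGetD marks i 0)) (0, 0, 0, false)
  let mF := if s.2.2.2 then max s.1 s.2.1 else s.1
  if mF = 0 then -1 else mF

-- ===== PORT B =====
-- split marks[:n] into maximal runs of non-2/3 marks, then fold the qualifying runs
def pvSplitStep (s : List (List Int) × List Int) (m : Int) : List (List Int) × List Int :=
  if m = 2 ∨ m = 3 then (if s.2 = [] then s else (s.1 ++ [s.2], ([] : List Int)))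
  else (s.1, s.2 ++ [m])

def pvBestStep (small : Bool) (b : Int) (run : List Int) : Int :=
  if 7 ≤ run.length ∨ small = true then max b (((run.take 7).count 5 : Nat) : Int) else b

def max_fives_count_in_sequence_alt (n : Int) (marks : List Int) : Int :=
  let pre := if 0 < n then PySem.List.slice marks none (some n) else []
  let p := pre.foldl pvSplitStep ([], [])
  let runs := p.1 ++ (if p.2 = [] then [] else [p.2])
  let small : Bool := decide (PySem.Int.floordiv (marks.length : Int) 2 < 7)
  let best := runs.foldl (pvBestStep small) 0
  if best = 0 then -1 else best

-- ===== PRECONDITION & SPEC =====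
-- A raises IndexError as soon as i reaches len(marks), i.e. whenever n > len(marks)
def Pre_max_fives_count_in_sequence (n : Int) (marks : List Int) : Prop := n ≤ (marks.length : Int)
instance (n : Int) (marks : List Int) : Decidable (Pre_max_fives_count_in_sequence n marks) := by unfold Pre_max_fives_count_in_sequence; infer_instance
def pvWitness_max_fives_count_in_sequence : Int × List Int := (5, [5, 2, 5, 5, 4])

def Spec_max_fives_count_in_sequence (n : Int) (marks : List Int) (out : Int) : Prop := out = max_fives_count_in_sequence_alt n marks
instance (n : Int) (marks : List Int) (out : Int) : Decidable (Spec_max_fives_count_in_sequence n marks out) := by unfold Spec_max_fives_count_in_sequence; infer_instance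

-- ===== CLAIM (what is proved, stated in full; the proofs are below) =====
def Claim_equal_max_fives_count_in_sequence : Prop := ∀ (n : Int) (marks : List Int), Dom_max_fives_count_in_sequence n marks → Pre_max_fives_count_in_sequence n marks → Spec_max_fives_count_in_sequence n marks (max_fives_count_in_sequence n marks)

-- ===== LEMMAS AND PROOFS =====

-- found flag ≡ qualification of the current run
def pvQual (small : Bool) (cur : List Int) : Bool :=
  decide (7 ≤ cur.length) || (small && !cur.isEmpty)

-- prepending already-finished runs only prepends to the first component
theorem pvSplit_prefix (l : List Int) : ∀ (rs : List (List Int)) (cur : List Int),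
    l.foldl pvSplitStep (rs, cur)
      = (rs ++ (l.foldl pvSplitStep ([], cur)).1, (l.foldl pvSplitStep ([], cur)).2) := by
  induction l with
  | nil => intro rs cur; simp
  | cons m l ih =>
    intro rs cur
    by_cases h23 : m = 2 ∨ m = 3
    · by_cases hc : cur = []
      · subst hc
        simp only [List.foldl_cons, pvSplitStep, if_pos h23]
        norm_num
        exact ih rs []
      · simp only [List.foldl_cons, pvSplitStep, if_pos h23, if_neg hc]
        rw [ih (rs ++ [cur]) [], ih ([] ++ [cur]) []]
        simp
    · simp only [List.foldl_cons, pvSplitStep, if_neg h23]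
      exact ih rs (cur ++ [m])

-- finishing a run: A's flush equals B's fold over the (possibly empty) last run
theorem pvFinish (small : Bool) (cur : List Int) (mF : Int) :
    (if pvQual small cur then max mF (((cur.take 7).count 5 : Nat) : Int) else mF)
      = (if cur = [] then ([] : List (List Int)) else [cur]).foldl (pvBestStep small) mF := by
  cases cur with
  | nil => simp [pvQual]
  | cons x xs =>
    simp only [List.cons_ne_nil, List.foldl_cons, List.foldl_nil, pvBestStep, pvQual,
      List.isEmpty_cons, Bool.not_false, Bool.and_true, reduceIte]
    by_cases h7 : 7 ≤ (x :: xs).length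
    · simp [h7]
    · cases small with
      | false => simp [h7]
      | true => simp

-- the key invariant: A's fold from a state describing partial run `cur` computes
-- B's fold over the runs of `l` continued from `cur`
theorem pvKey (small : Bool) (l : List Int) : ∀ (cur : List Int) (mF : Int),
    (let s := l.foldl (pvAStep small)
        (mF, (((cur.take 7).count 5 : Nat) : Int), (cur.length : Int), pvQual small cur);
     if s.2.2.2 then max s.1 s.2.1 else s.1)
      = (let p := l.foldl pvSplitStep ([], cur);
         (p.1 ++ (if p.2 = [] then [] else [p.2])).foldl (pvBestStep small) mF) := by
  induction l with
  | nil =>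
    intro cur mF
    simp only [List.foldl_nil]
    exact pvFinish small cur mF
  | cons m l ih =>
    intro cur mF
    by_cases h23 : m = 2 ∨ m = 3
    · have hA : pvAStep small
          (mF, (((cur.take 7).count 5 : Nat) : Int), (cur.length : Int), pvQual small cur) m
          = ((if pvQual small cur then max mF (((cur.take 7).count 5 : Nat) : Int) else mF),
             0, 0, false) := by
        rcases h23 with h | h <;> subst h <;>
          · simp only [pvAStep]
            norm_num
            split <;> simp_all
      have ih0 := ih [] (if pvQual small cur then max mF (((cur.take 7).count 5 : Nat) : Int) else mF)
      have hq0 : pvQual small [] = false := by simp [pvQual]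
      simp only [List.take_nil, List.count_nil, Nat.cast_zero, List.length_nil, hq0] at ih0
      have hS : pvSplitStep ([], cur) m = ((if cur = [] then [] else [cur]), ([] : List Int)) := by
        rcases h23 with h | h <;> subst h <;>
          · simp only [pvSplitStep]
            norm_num
            split <;> simp_all
      simp only [List.foldl_cons, hA, hS, ih0,
        pvSplit_prefix l (if cur = [] then [] else [cur]) []]
      rw [List.append_assoc,
        List.foldl_append (l := (if cur = [] then ([] : List (List Int)) else [cur])),
        ← pvFinish small cur mF, List.foldl_append]
    · push_neg at h23
      have hA : pvAStep small
          (mF, (((cur.take 7).count 5 : Nat) : Int), (cur.length : Int), pvQual small cur) m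
          = (mF, ((((cur ++ [m]).take 7).count 5 : Nat) : Int), ((cur ++ [m]).length : Int),
             pvQual small (cur ++ [m])) := by
        simp only [pvAStep, if_pos (show m ≠ 2 ∧ m ≠ 3 from ⟨h23.1, h23.2⟩), Prod.mk.injEq]
        refine ⟨trivial, ?_, ?_, ?_⟩
        · by_cases hlen : cur.length < 7
          · have ht : (cur ++ [m]).take 7 = cur ++ [m] := by
              rw [List.take_of_length_le]; simp; omega
            have ht2 : cur.take 7 = cur := List.take_of_length_le (by omega)
            by_cases hm : m = 5
            · subst hm
              rw [if_pos (show (5:Int) = 5 ∧ (cur.length : Int) < 7 from ⟨rfl, by exact_mod_cast hlen⟩)]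
              rw [ht, ht2, List.count_append]
              push_cast
              simp
            · have hns : ¬ (m = 5 ∧ (cur.length : Int) < 7) := by tauto
              rw [if_neg hns, ht, ht2, List.count_append]
              simp [hm]
          · have ht : (cur ++ [m]).take 7 = cur.take 7 := List.take_append_of_le_length (by omega)
            have hns : ¬ (m = 5 ∧ (cur.length : Int) < 7) := by rintro ⟨_, h⟩; omega
            rw [if_neg hns, ht]
        · simp
        · have hne : (cur ++ [m]).isEmpty = false := by simp
          by_cases hcond : (cur.length : Int) + 1 = 7 ∨ small = true
          · rw [if_pos hcond]
            rcases hcond with h | h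
            · have h7 : 7 ≤ cur.length + 1 := by omega
              simp [pvQual, hne, h7]
            · simp [pvQual, hne, h]
          · push_neg at hcond
            rw [if_neg (by push_neg; exact hcond)]
            have h7 : (7 ≤ cur.length + 1) = (7 ≤ cur.length) := by
              have h1 := hcond.1
              simp only [eq_iff_iff]
              omega
            simp [pvQual, hne, hcond.2, h7]
      have hS : pvSplitStep ([], cur) m = ([], cur ++ [m]) := by
        simp [pvSplitStep, h23.1, h23.2]
      simp only [List.foldl_cons, hA, hS]
      exact ih (cur ++ [m]) mF

-- ===== VERDICT (by name: the statement is the Claim_ definition above) =====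
theorem max_fives_count_in_sequence_spec : Claim_equal_max_fives_count_in_sequence := by
  intro n marks _ hpre
  unfold Pre_max_fives_count_in_sequence at hpre
  unfold Spec_max_fives_count_in_sequence
  unfold max_fives_count_in_sequence max_fives_count_in_sequence_alt
  by_cases hn : 0 < n
  · set sm : Bool := decide (PySem.Int.floordiv ((marks.length : Int)) 2 < 7) with hsm
    set q : List Int := marks.take n.toNat with hq
    have hsl : PySem.List.slice marks none (some n) = q :=
      PySem.List.slice_to marks (le_of_lt hn)
    have hlen : (q.length : Int) = n := by rw [hq]; simp; omega
    have hcg : (PySem.List.pyRange 0 n 1).foldl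
        (fun s i => pvAStep sm s (PySem.List.pyGetD marks i 0)) (0, 0, 0, false)
        = (PySem.List.pyRange 0 n 1).foldl
        (fun s i => pvAStep sm s (PySem.List.pyGetD q i 0)) (0, 0, 0, false) := by
      refine PySem.List.foldl_congr_mem _ _ _ _ ?_
      intro acc i hi
      rw [PySem.List.mem_pyRange_one] at hi
      have hi2 : i < (q.length : Int) := by rw [hlen]; exact hi.2
      have hi3 : i < (marks.length : Int) := by
        have : q.length ≤ marks.length := by rw [hq, List.length_take]; omega
        omega
      rw [PySem.List.pyGetD_eq_getElem marks 0 hi.1 hi3,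
          PySem.List.pyGetD_eq_getElem q 0 hi.1 hi2]
      congr 1
      exact List.getElem_take.symm
    have hfold : (PySem.List.pyRange 0 n 1).foldl
        (fun s i => pvAStep sm s (PySem.List.pyGetD marks i 0)) (0, 0, 0, false)
        = q.foldl (pvAStep sm) (0, 0, 0, false) := by
      rw [hcg, ← hlen]
      exact PySem.List.foldl_pyRange_zero_pyGetD q 0 (pvAStep sm) (0, 0, 0, false)
    have hkey := pvKey sm q [] 0
    have hq0 : pvQual sm [] = false := by simp [pvQual]
    simp only [List.take_nil, List.count_nil, Nat.cast_zero, List.length_nil, hq0] at hkey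
    simp only [if_pos hn, hsl, hfold]
    rw [hkey]
  · have hr : PySem.List.pyRange 0 n 1 = [] := PySem.List.pyRange_one_eq_nil (by omega)
    simp [hr, hn]
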